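-- pv_equiv track=rewrite | github.com/Syntax-Programmer/ChessGame | ChessGame/Game/Engine.py | diagonal_sliding_address
-- ===== SOURCE A (Python) =====
-- from typing import List, Tuple, Dict, Literal
--
-- INT_RANGE = Literal[0, 1, 2, 3, 4, 5, 6, 7]
--
-- def sliding_address_filter(
--     constructor: Tuple[INT_RANGE, INT_RANGE],
--     to_filter: List[Tuple[INT_RANGE, INT_RANGE]],
--     occupied_squares: Dict[Tuple[INT_RANGE, INT_RANGE], str],
-- ) -> List[Tuple[INT_RANGE, INT_RANGE] | None]:
--     """
--     Filter the given general address of a sliding piece.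
--
--     Takes in a generally made sliding address and restricts it to only those squares
--     that the piece on the provided constructor can move to.
--
--     Parameters:
--     ----------
--     1. constructor : Tuple[INT_RANGE, INT_RANGE]
--         A location on the board w.r.t the address was made.
--     2. to_filter : List[Tuple[INT_RANGE, INT_RANGE]]
--         A address that was made w.r.t constructor and is to be filtered.
--     3. occupied_squares : Dict[Tuple[INT_RANGE, INT_RANGE], str]
--         A dictionary of all the occupied squares mapped to the piece occupying that square.
--
--     Returns:
--     -------
--     List[Tuple[INT_RANGE, INT_RANGE]] :
--         The filtered address only containing the reachable squares
--     """
--     left_reach_index = 0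
--     right_reach_index = len(to_filter) - 1
--     constructor_index = to_filter.index(constructor)
--     for indices in range(len(to_filter)):
--         if indices < constructor_index and to_filter[indices] in occupied_squares:
--             left_reach_index = indices
--         if indices > constructor_index and to_filter[indices] in occupied_squares:
--             right_reach_index = indices
--             # Because we need the first occurrence of a piece to the right of the gives constructor.
--             break
--     to_filter = to_filter[left_reach_index : right_reach_index + 1]
--     # Because a piece can't move to it's own location.
--     to_filter.remove(constructor)
--     return to_filter
--
-- def diagonal_sliding_address(
--     sq_index: Tuple[INT_RANGE, INT_RANGE],
--     occupied_squares: Dict[Tuple[INT_RANGE, INT_RANGE], str],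
-- ) -> Tuple[
--     List[Tuple[INT_RANGE, INT_RANGE] | None], List[Tuple[INT_RANGE, INT_RANGE] | None]
-- ]:
--     """
--     Creates a general movable locations of a bishop/queen.
--
--     Takes in a sq_index and creates all possible locations a bishop/queen on that given sq_index can move to.
--     OR
--     An opponent bishop/queen on the created locations can attack the provided sq_index.
--
--     Parameters:
--     ----------
--     1. sq_index : Tuple[INT_RANGE, INT_RANGE]
--         A location on the board w.r.t the address is to be made.
--     2. occupied_squares : Dict[Tuple[INT_RANGE, INT_RANGE], str]
--         A dictionary of all the occupied squares mapped to the piece occupying that square.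
--
--     Returns:
--     -------
--     Tuple[
--     List[Tuple[INT_RANGE, INT_RANGE] | None], List[Tuple[INT_RANGE, INT_RANGE] | None]
--     ] :\n
--         Creates two lists :\n
--         1. List1 : All the reachable squares in the same anti-diagonal as the bishop/queen.\n
--                 OR\n
--                 An opponent rook/queen on the created locations can attack the provided sq_index.\n
--         2. List2 : All the reachable squares in the same main-diagonal as the bishop/queen.\n
--                 OR\n
--                 An opponent rook/queen on the created locations can attack the provided sq_index.
--     """
--     piece_diagonal1 = [
--         (sq_index[0] + step, sq_index[1] - step)
--         for step in range(-7, 8)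
--         if sq_index[0] + step in range(8) and sq_index[1] - step in range(8)
--     ]
--     piece_diagonal2 = [
--         (sq_index[0] + step, sq_index[1] + step)
--         for step in range(-7, 8)
--         if sq_index[0] + step in range(8) and sq_index[1] + step in range(8)
--     ]
--     return (
--         sliding_address_filter(
--             constructor=sq_index,
--             to_filter=piece_diagonal1,
--             occupied_squares=occupied_squares,
--         ),
--         sliding_address_filter(
--             constructor=sq_index,
--             to_filter=piece_diagonal2,
--             occupied_squares=occupied_squares,
--         ),
--     )
-- ===== SOURCE B (Python) =====
-- def diagonal_sliding_address(sq_index, occupied_squares):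
--     # Ray-walk outward from sq_index in the four diagonal directions instead of
--     # building the whole diagonal and index-filtering it.
--     def ray(dr, dc):
--         out = []
--         r, c = sq_index[0] + dr, sq_index[1] + dc
--         while 0 <= r < 8 and 0 <= c < 8:
--             out.append((r, c))
--             if (r, c) in occupied_squares:
--                 break
--             r += dr
--             c += dc
--         return out
--
--     anti = ray(-1, 1)[::-1] + ray(1, -1)
--     main = ray(-1, -1)[::-1] + ray(1, 1)
--     return (anti, main)
-- ===== Notes on version B (the rewrite author's own statement) =====
-- stated objective: alternative
-- what changed: B ray-walks outward from sq_index in the four diagonal directions, stopping at the first occupied square, instead of A's building each full diagonal via a range(-7,8) comprehension, finding the origin's index, scanning all indices for blockers, slicing and removing the origin.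
import Mathlib
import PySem

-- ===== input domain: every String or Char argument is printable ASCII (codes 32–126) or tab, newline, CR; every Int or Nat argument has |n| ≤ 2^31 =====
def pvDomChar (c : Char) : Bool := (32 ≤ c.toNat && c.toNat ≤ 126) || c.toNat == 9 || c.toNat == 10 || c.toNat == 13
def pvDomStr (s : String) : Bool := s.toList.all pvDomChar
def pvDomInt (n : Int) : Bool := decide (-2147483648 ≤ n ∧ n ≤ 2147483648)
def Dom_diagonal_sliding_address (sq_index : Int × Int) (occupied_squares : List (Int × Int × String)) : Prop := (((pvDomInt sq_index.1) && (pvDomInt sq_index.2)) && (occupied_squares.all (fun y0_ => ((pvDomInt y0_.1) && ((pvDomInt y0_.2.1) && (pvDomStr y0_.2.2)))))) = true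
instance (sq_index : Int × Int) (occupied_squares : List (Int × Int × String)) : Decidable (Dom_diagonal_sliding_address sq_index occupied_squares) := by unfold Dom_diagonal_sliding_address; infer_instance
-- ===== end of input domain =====

-- B generates each half-diagonal by ray-walking outward from sq_index (stopping at the first
-- occupied square) instead of building the full diagonal and index-filtering it as A does.

-- ===== PORT A =====

-- '(i, j) in occupied_squares' : key membership in the dict (assoc list of (row, col, piece))
def pvKeyMem (occ : List (Int × Int × String)) (x : Int × Int) : Bool :=
  occ.any (fun e => e.1 == x.1 && e.2.1 == x.2)

-- the diagonal comprehension: [(r+s, c+dc*s) for s in range(-7,8) if r+s in range(8) and c+dc*s in range(8)]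
def pvDiag (r c dc : Int) : List (Int × Int) :=
  ((PySem.List.pyRange (-7) 8 1).filter
    (fun s => decide (0 ≤ r + s) && decide (r + s < 8) && decide (0 ≤ c + dc * s) && decide (c + dc * s < 8))).map
    (fun s => (r + s, c + dc * s))

-- the 'for indices in range(len(to_filter))' loop with its break
def pvSafLoop (p : (Int × Int) → Bool) (k : Int) :
    List (Int × Int) → Nat → Int → Int → Int × Int
  | [], _, left, right => (left, right)
  | x :: xs, i, left, right =>
    let left' := if decide ((i : Int) < k) && p x then (i : Int) else left
    if decide ((i : Int) > k) && p x then (left', (i : Int))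
    else pvSafLoop p k xs (i + 1) left' right

def sliding_address_filter (constructor : Int × Int) (to_filter : List (Int × Int))
    (occupied_squares : List (Int × Int × String)) : List (Int × Int) :=
  match PySem.List.index? to_filter constructor with
  | none => []        -- ValueError: constructor not on the list (excluded by Pre_)
  | some k =>
    let lr := pvSafLoop (pvKeyMem occupied_squares) (k : Int) to_filter 0 0 ((to_filter.length : Int) - 1)
    let sliced := PySem.List.slice to_filter (some lr.1) (some (lr.2 + 1))
    match PySem.List.remove? sliced constructor with
    | none => []      -- ValueError from .remove (unreachable under Pre_)
    | some res => res

def diagonal_sliding_address (sq_index : Int × Int) (occupied_squares : List (Int × Int × String)) : (List (Int × Int)) × (List (Int × Int)) :=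
  (sliding_address_filter sq_index (pvDiag sq_index.1 sq_index.2 (-1)) occupied_squares,
   sliding_address_filter sq_index (pvDiag sq_index.1 sq_index.2 1) occupied_squares)

-- ===== PORT B =====

-- the 'while 0 <= r < 8 and 0 <= c < 8' walk; a diagonal ray on the 8×8 board visits at most
-- 8 squares, so fuel 8 reproduces the Python while-loop exactly
def pvRay (p : (Int × Int) → Bool) (dr dc : Int) : Nat → Int → Int → List (Int × Int)
  | 0, _, _ => []
  | fuel + 1, r, c =>
    if decide (0 ≤ r) && decide (r < 8) && decide (0 ≤ c) && decide (c < 8) then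
      if p (r, c) then [(r, c)]
      else (r, c) :: pvRay p dr dc fuel (r + dr) (c + dc)
    else []

def diagonal_sliding_address_alt (sq_index : Int × Int) (occupied_squares : List (Int × Int × String)) : (List (Int × Int)) × (List (Int × Int)) :=
  let p := pvKeyMem occupied_squares
  let ray := fun (dr dc : Int) => pvRay p dr dc 8 (sq_index.1 + dr) (sq_index.2 + dc)
  ((ray (-1) 1).reverse ++ ray 1 (-1),
   (ray (-1) (-1)).reverse ++ ray 1 1)

-- ===== PRECONDITION & SPEC =====
-- A raises ValueError (to_filter.index) whenever sq_index is not an on-board square; Pre_ is the board.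
def Pre_diagonal_sliding_address (sq_index : Int × Int) (occupied_squares : List (Int × Int × String)) : Prop :=
  0 ≤ sq_index.1 ∧ sq_index.1 < 8 ∧ 0 ≤ sq_index.2 ∧ sq_index.2 < 8
instance (sq_index : Int × Int) (occupied_squares : List (Int × Int × String)) : Decidable (Pre_diagonal_sliding_address sq_index occupied_squares) := by unfold Pre_diagonal_sliding_address; infer_instance
def pvWitness_diagonal_sliding_address : (Int × Int) × (List (Int × Int × String)) :=
  ((3, 3), [(1, 1, "p"), (5, 1, "n")])

def Spec_diagonal_sliding_address (sq_index : Int × Int) (occupied_squares : List (Int × Int × String)) (out : (List (Int × Int)) × (List (Int × Int))) : Prop := out = diagonal_sliding_address_alt sq_index occupied_squares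
instance (sq_index : Int × Int) (occupied_squares : List (Int × Int × String)) (out : (List (Int × Int)) × (List (Int × Int))) : Decidable (Spec_diagonal_sliding_address sq_index occupied_squares out) := by unfold Spec_diagonal_sliding_address; infer_instance

-- ===== CLAIM (what is proved, stated in full; the proofs are below) =====
def Claim_equal_diagonal_sliding_address : Prop := ∀ (sq_index : Int × Int) (occupied_squares : List (Int × Int × String)), Dom_diagonal_sliding_address sq_index occupied_squares → Pre_diagonal_sliding_address sq_index occupied_squares → Spec_diagonal_sliding_address sq_index occupied_squares (diagonal_sliding_address sq_index occupied_squares)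

-- ===== LEMMAS AND PROOFS =====

-- pvWalk p xs : the prefix of xs up to and including the first x with p x
def pvWalk (p : (Int × Int) → Bool) : List (Int × Int) → List (Int × Int)
  | [] => []
  | x :: xs => if p x then [x] else x :: pvWalk p xs

-- pvFull : the positions the while-loop visits ignoring occupancy (the full on-board ray)
def pvFull (dr dc : Int) : Nat → Int → Int → List (Int × Int)
  | 0, _, _ => []
  | fuel + 1, r, c =>
    if decide (0 ≤ r) && decide (r < 8) && decide (0 ≤ c) && decide (c < 8) then
      (r, c) :: pvFull dr dc fuel (r + dr) (c + dc)
    else []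

theorem pvRay_eq_walk (p : (Int × Int) → Bool) (dr dc : Int) (fuel : Nat) (r c : Int) :
    pvRay p dr dc fuel r c = pvWalk p (pvFull dr dc fuel r c) := by
  induction fuel generalizing r c with
  | zero => rfl
  | succ n ih =>
    simp only [pvRay, pvFull]
    split
    · simp only [pvWalk]
      split
      · rfl
      · rw [ih]
    · rfl

theorem pvWalk_length_le (p : (Int × Int) → Bool) (xs : List (Int × Int)) :
    (pvWalk p xs).length ≤ xs.length := by
  induction xs with
  | nil => simp [pvWalk]
  | cons x xs ih =>
    simp only [pvWalk]
    split <;> simp <;> omega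

theorem pvWalk_eq_take (p : (Int × Int) → Bool) (xs : List (Int × Int)) :
    pvWalk p xs = xs.take (pvWalk p xs).length := by
  induction xs with
  | nil => rfl
  | cons x xs ih =>
    simp only [pvWalk]
    split
    · simp
    · simp only [List.length_cons, List.take_succ_cons]
      rw [← ih]

-- phase-1 accumulator: last occupied index (or the initial left)
def pvLF (p : (Int × Int) → Bool) : List (Int × Int) → Nat → Int → Int
  | [], _, l => l
  | x :: xs, i, l => pvLF p xs (i + 1) (if p x then (i : Int) else l)

theorem pvSafLoop_phase1 (p : (Int × Int) → Bool) (k : Nat) (rest : List (Int × Int))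
    (xs : List (Int × Int)) (i : Nat) (left right : Int) (h : i + xs.length ≤ k) :
    pvSafLoop p (k : Int) (xs ++ rest) i left right
      = pvSafLoop p (k : Int) rest (i + xs.length) (pvLF p xs i left) right := by
  induction xs generalizing i left with
  | nil => simp [pvLF]
  | cons x xs ih =>
    have hik : i < k := by simp only [List.length_cons] at h; omega
    simp only [List.cons_append, pvSafLoop, pvLF]
    have h1 : decide ((i : Int) < (k : Int)) = true := by
      simp only [decide_eq_true_eq]; exact_mod_cast hik
    have h2 : decide ((i : Int) > (k : Int)) = false := by
      simp only [gt_iff_lt, decide_eq_false_iff_not, Int.not_lt]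
      exact_mod_cast Nat.le_of_lt hik
    rw [h1, h2]
    simp only [Bool.true_and, Bool.false_and, Bool.false_eq_true, if_false]
    rw [ih (i + 1) _ (by simp only [List.length_cons] at h; omega)]
    have harg : i + 1 + xs.length = i + (x :: xs).length := by
      simp only [List.length_cons]; omega
    rw [harg]

theorem pvSafLoop_at_k (p : (Int × Int) → Bool) (k : Nat) (o : Int × Int)
    (rest : List (Int × Int)) (left right : Int) :
    pvSafLoop p (k : Int) (o :: rest) k left right
      = pvSafLoop p (k : Int) rest (k + 1) left right := by
  simp [pvSafLoop]

theorem pvSafLoop_phase2 (p : (Int × Int) → Bool) (k : Nat) (xs : List (Int × Int))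
    (i : Nat) (left : Int) (h : k < i) :
    pvSafLoop p (k : Int) xs i left ((k : Int) + ((i - k - 1 : Nat) : Int) + ((xs.length : Nat) : Int))
      = (left, (k : Int) + ((i - k - 1 : Nat) : Int) + (((pvWalk p xs).length : Nat) : Int)) := by
  induction xs generalizing i with
  | nil => simp [pvSafLoop, pvWalk]
  | cons x xs ih =>
    simp only [pvSafLoop]
    have h1 : decide ((i : Int) < (k : Int)) = false := by
      simp only [decide_eq_false_iff_not, Int.not_lt]
      exact_mod_cast Nat.le_of_lt h
    have h2 : decide ((i : Int) > (k : Int)) = true := by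
      simp only [gt_iff_lt, decide_eq_true_eq]; exact_mod_cast h
    rw [h1, h2]
    simp only [Bool.false_and, Bool.true_and, Bool.false_eq_true, if_false]
    by_cases hp : p x = true
    · simp only [hp, if_true, pvWalk]
      have hv : (k : Int) + ((i - k - 1 : Nat) : Int) + (([x].length : Nat) : Int) = (i : Int) := by
        simp only [List.length_cons, List.length_nil]; push_cast; omega
      rw [hv]
    · simp only [Bool.not_eq_true] at hp
      simp only [hp, Bool.false_eq_true, if_false, pvWalk]
      have harg : (k : Int) + ((i - k - 1 : Nat) : Int) + (((x :: xs).length : Nat) : Int)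
          = (k : Int) + ((i + 1 - k - 1 : Nat) : Int) + ((xs.length : Nat) : Int) := by
        simp only [List.length_cons]; push_cast; omega
      rw [harg, ih (i + 1) (by omega)]
      have : (k : Int) + ((i + 1 - k - 1 : Nat) : Int) + (((pvWalk p xs).length : Nat) : Int)
          = (k : Int) + ((i - k - 1 : Nat) : Int) + (((x :: pvWalk p xs).length : Nat) : Int) := by
        simp only [List.length_cons]; push_cast; omega
      rw [this]

theorem pvLF_append (p : (Int × Int) → Bool) (x : Int × Int) (xs : List (Int × Int))
    (i : Nat) (l : Int) :
    pvLF p (xs ++ [x]) i l = if p x then ((i + xs.length : Nat) : Int) else pvLF p xs i l := by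
  induction xs generalizing i l with
  | nil => simp [pvLF]
  | cons y ys ih =>
    simp only [List.cons_append, pvLF, ih]
    congr 1
    simp only [List.length_cons]
    push_cast
    omega

theorem pvLF_eq (p : (Int × Int) → Bool) (xs : List (Int × Int)) :
    pvLF p xs 0 0 = (xs.length : Int) - ((pvWalk p xs.reverse).length : Int) := by
  induction xs using List.reverseRecOn with
  | nil => simp [pvLF, pvWalk]
  | append_singleton ys x ih =>
    rw [pvLF_append]
    simp only [List.reverse_append, List.reverse_singleton, List.singleton_append, pvWalk]
    by_cases hp : p x = true
    · simp [hp]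
    · simp only [Bool.not_eq_true] at hp
      simp only [hp, if_neg (by simp : ¬ (false = true)), ih]
      simp

theorem pvRemove_mid (o : Int × Int) (D W : List (Int × Int)) (hD : o ∉ D) :
    PySem.List.remove? (D ++ o :: W) o = some (D ++ W) := by
  induction D with
  | nil => simp [PySem.List.remove?_cons_self]
  | cons d ds ih =>
    have hne : d ≠ o := by intro h; exact hD (by simp [h])
    rw [List.cons_append, PySem.List.remove?_cons_of_ne _ hne,
      ih (by intro h; exact hD (by simp [h]))]
    rfl

-- the central filter lemma: A's index-filter on Bef ++ o :: Aft equals the two walks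
theorem saf_eq (occ : List (Int × Int × String)) (o : Int × Int)
    (Bef Aft : List (Int × Int)) (hB : o ∉ Bef) :
    sliding_address_filter o (Bef ++ o :: Aft) occ
      = (pvWalk (pvKeyMem occ) Bef.reverse).reverse ++ pvWalk (pvKeyMem occ) Aft := by
  have hidx : PySem.List.index? (Bef ++ o :: Aft) o = some Bef.length :=
    (PySem.List.index?_eq_some_iff _ _ _).mpr ⟨Bef, Aft, rfl, rfl, hB⟩
  have hwB : (pvWalk (pvKeyMem occ) Bef.reverse).length ≤ Bef.length := by
    have := pvWalk_length_le (pvKeyMem occ) Bef.reverse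
    simpa using this
  simp only [sliding_address_filter, hidx]
  have hloop : pvSafLoop (pvKeyMem occ) (Bef.length : Int) (Bef ++ o :: Aft) 0 0
        (((Bef ++ o :: Aft).length : Int) - 1)
      = ((Bef.length : Int) - ((pvWalk (pvKeyMem occ) Bef.reverse).length : Int),
         (Bef.length : Int) + ((Bef.length + 1 - Bef.length - 1 : Nat) : Int)
           + (((pvWalk (pvKeyMem occ) Aft).length : Nat) : Int)) := by
    rw [show (((Bef ++ o :: Aft).length : Int) - 1)
        = (Bef.length : Int) + ((Bef.length + 1 - Bef.length - 1 : Nat) : Int) + ((Aft.length : Nat) : Int) by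
      simp only [List.length_append, List.length_cons]; push_cast; omega]
    rw [pvSafLoop_phase1 (pvKeyMem occ) Bef.length (o :: Aft) Bef 0 0 _ (by omega)]
    rw [show (0 + Bef.length) = Bef.length from by omega]
    rw [pvSafLoop_at_k, pvSafLoop_phase2 (pvKeyMem occ) Bef.length Aft (Bef.length + 1) _ (by omega)]
    rw [pvLF_eq]
  rw [hloop]
  simp only
  rw [show ((Bef.length : Int) - ((pvWalk (pvKeyMem occ) Bef.reverse).length : Int))
      = ((Bef.length - (pvWalk (pvKeyMem occ) Bef.reverse).length : Nat) : Int) from by push_cast; omega]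
  rw [show ((Bef.length : Int) + ((Bef.length + 1 - Bef.length - 1 : Nat) : Int)
        + (((pvWalk (pvKeyMem occ) Aft).length : Nat) : Int) + 1)
      = ((Bef.length + (pvWalk (pvKeyMem occ) Aft).length + 1 : Nat) : Int) from by push_cast; omega]
  rw [PySem.List.slice_natCast]
  rw [List.drop_append_of_le_length (by omega)]
  rw [show (Bef.length + (pvWalk (pvKeyMem occ) Aft).length + 1)
        - (Bef.length - (pvWalk (pvKeyMem occ) Bef.reverse).length)
      = (pvWalk (pvKeyMem occ) Bef.reverse).length + ((pvWalk (pvKeyMem occ) Aft).length + 1) from by omega]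
  rw [List.take_append]
  have hD0len : (Bef.drop (Bef.length - (pvWalk (pvKeyMem occ) Bef.reverse).length)).length
      = (pvWalk (pvKeyMem occ) Bef.reverse).length := by
    rw [List.length_drop]; omega
  rw [List.take_of_length_le (by omega), hD0len]
  rw [show (pvWalk (pvKeyMem occ) Bef.reverse).length + ((pvWalk (pvKeyMem occ) Aft).length + 1)
        - (pvWalk (pvKeyMem occ) Bef.reverse).length
      = (pvWalk (pvKeyMem occ) Aft).length + 1 from by omega]
  rw [List.take_succ_cons, ← pvWalk_eq_take]
  have hD0 : Bef.drop (Bef.length - (pvWalk (pvKeyMem occ) Bef.reverse).length)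
      = (pvWalk (pvKeyMem occ) Bef.reverse).reverse := by
    conv_rhs => rw [pvWalk_eq_take (pvKeyMem occ) Bef.reverse]
    rw [List.take_reverse, List.reverse_reverse]
  have hno : o ∉ Bef.drop (Bef.length - (pvWalk (pvKeyMem occ) Bef.reverse).length) :=
    fun h => hB (List.mem_of_mem_drop h)
  rw [pvRemove_mid o _ _ hno, hD0]

-- the board geometry: for an on-board square the diagonal comprehension splits into the two rays
theorem diag_split :
    ∀ a ∈ List.range 8, ∀ b ∈ List.range 8,
      (pvDiag (a : Int) (b : Int) (-1)
          = (pvFull (-1) 1 8 ((a : Int) - 1) ((b : Int) + 1)).reverse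
              ++ ((a : Int), (b : Int)) :: pvFull 1 (-1) 8 ((a : Int) + 1) ((b : Int) - 1)
        ∧ ((a : Int), (b : Int)) ∉ pvFull (-1) 1 8 ((a : Int) - 1) ((b : Int) + 1)
        ∧ ((a : Int), (b : Int)) ∉ pvFull 1 (-1) 8 ((a : Int) + 1) ((b : Int) - 1))
      ∧ (pvDiag (a : Int) (b : Int) 1
          = (pvFull (-1) (-1) 8 ((a : Int) - 1) ((b : Int) - 1)).reverse
              ++ ((a : Int), (b : Int)) :: pvFull 1 1 8 ((a : Int) + 1) ((b : Int) + 1)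
        ∧ ((a : Int), (b : Int)) ∉ pvFull (-1) (-1) 8 ((a : Int) - 1) ((b : Int) - 1)
        ∧ ((a : Int), (b : Int)) ∉ pvFull 1 1 8 ((a : Int) + 1) ((b : Int) + 1)) := by
  decide

-- ===== VERDICT (by name: the statement is the Claim_ definition above) =====
theorem diagonal_sliding_address_spec : Claim_equal_diagonal_sliding_address := by
  intro sq occ _ hpre
  obtain ⟨r, c⟩ := sq
  obtain ⟨h1, h2, h3, h4⟩ := hpre
  lift r to Nat using h1 with a
  lift c to Nat using h3 with b
  have ha : a ∈ List.range 8 := by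
    simp only [List.mem_range]; exact_mod_cast h2
  have hb : b ∈ List.range 8 := by
    simp only [List.mem_range]; exact_mod_cast h4
  obtain ⟨⟨e1, m1, _⟩, ⟨e2, m3, _⟩⟩ := diag_split a ha b hb
  unfold Spec_diagonal_sliding_address diagonal_sliding_address diagonal_sliding_address_alt
  simp only
  rw [e1, e2]
  rw [saf_eq occ _ _ _ (by simpa using m1), saf_eq occ _ _ _ (by simpa using m3)]
  simp only [List.reverse_reverse, pvRay_eq_walk, ← sub_eq_add_neg]
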